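-- pv_equiv track=rewrite | github.com/luoning9/quizit | local/gen_deck_images.py | extract_markdown_images
-- ===== SOURCE A (Python) =====
-- from typing import List, Optional, Tuple
--
-- def extract_markdown_images(text: str) -> List[Tuple[Optional[str], Optional[str]]]:
--     """
--     提取 markdown 图片语法：
--     - ![alt](url) → (alt, url)
--     - ![alt]      → (alt, None)
--     """
--     results: List[Tuple[Optional[str], Optional[str]]] = []
--     i = 0
--     while i < len(text):
--         bang = text.find("![", i)
--         if bang == -1:
--             break
--         close_bracket = text.find("]", bang + 2)
--         if close_bracket == -1:
--             break
--
--         alt_text = text[bang + 2 : close_bracket].strip()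
--         url: Optional[str] = None
--
--         if close_bracket + 1 < len(text) and text[close_bracket + 1] == "(":
--             close_paren = text.find(")", close_bracket + 2)
--             if close_paren != -1:
--                 url = text[close_bracket + 2 : close_paren].strip()
--                 i = close_paren + 1
--             else:
--                 i = close_bracket + 2
--         else:
--             i = close_bracket + 1
--
--         results.append((alt_text or None, url or None))
--     return results
-- ===== SOURCE B (Python) =====
-- import re
-- from typing import List, Optional, Tuple
--
-- _IMG_RE = re.compile(r"!\[(.*?)\](?:\((.*?)\))?", re.DOTALL)
--
-- def extract_markdown_images(text: str) -> List[Tuple[Optional[str], Optional[str]]]: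
--     """Match all images with one compiled regex instead of a manual find-loop."""
--     results: List[Tuple[Optional[str], Optional[str]]] = []
--     for m in _IMG_RE.finditer(text):
--         alt, url = m.group(1), m.group(2)
--         results.append((alt.strip() or None,
--                         url.strip() or None if url is not None else None))
--     return results
-- ===== Notes on version B (the rewrite author's own statement) =====
-- stated objective: idiomatic
-- what changed: A's hand-written while-loop over a cursor with repeated str.find/indexing/slicing is replaced by a single compiled regex (re.finditer on a lazy pattern with an optional paren group, re.DOTALL) whose match groups are post-processed with strip()/or-None.
import Mathlib
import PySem

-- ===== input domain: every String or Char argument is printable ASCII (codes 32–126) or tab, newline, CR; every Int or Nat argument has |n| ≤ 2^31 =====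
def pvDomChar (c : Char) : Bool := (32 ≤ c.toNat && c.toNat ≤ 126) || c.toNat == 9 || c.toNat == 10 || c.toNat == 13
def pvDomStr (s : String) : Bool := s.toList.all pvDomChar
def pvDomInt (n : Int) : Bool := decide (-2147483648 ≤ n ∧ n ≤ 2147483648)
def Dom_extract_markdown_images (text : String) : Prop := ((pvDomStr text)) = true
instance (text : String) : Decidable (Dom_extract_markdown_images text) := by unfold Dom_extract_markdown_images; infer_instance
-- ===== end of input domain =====

-- B replaces A's manual find-and-index loop with a single regex pass (re.finditer); same return value proved below.

-- shared idiom `x.strip() or None` of both Pythons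
def pvOrNone (cs : List Char) : Option String :=
  let t := PySem.Chars.strip cs
  if t = [] then none else some (String.ofList t)

-- ===== PORT A =====
-- A's while-loop over the cursor i; fuel = len+1 suffices since each iteration moves i forward by ≥ 3
def pvGoA (cs : List Char) : Nat → Int → List (Option String × Option String)
  | 0, _ => []
  | fuel + 1, i =>
    if i < (cs.length : Int) then
      let bang := PySem.Chars.findFrom cs ['!', '['] i
      if bang = -1 then []
      else
        let cb := PySem.Chars.findFrom cs [']'] (bang + 2)
        if cb = -1 then []
        else
          let alt := pvOrNone (PySem.List.slice cs (some (bang + 2)) (some cb))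
          if (decide (cb + 1 < (cs.length : Int))) && (PySem.List.pyGet? cs (cb + 1) == some '(') then
            let cp := PySem.Chars.findFrom cs [')'] (cb + 2)
            if cp ≠ -1 then
              (alt, pvOrNone (PySem.List.slice cs (some (cb + 2)) (some cp))) :: pvGoA cs fuel (cp + 1)
            else
              (alt, none) :: pvGoA cs fuel (cb + 2)
          else
            (alt, none) :: pvGoA cs fuel (cb + 1)
    else []

def extract_markdown_images (text : String) : List (Option String × Option String) :=
  pvGoA text.toList (text.toList.length + 1) 0

-- ===== PORT B =====
-- Hand port of the regex engine restricted to the fixed pattern !\[(.*?)\](?:\((.*?)\))? with re.DOTALL: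
-- pvPartition sep s splits s at the FIRST occurrence of sep (= what the lazy quantifier before a literal matches).
def pvPartition (sep : List Char) : List Char → Option (List Char × List Char)
  | [] => if sep.isPrefixOf ([] : List Char) then some ([], []) else none
  | c :: cs =>
    if sep.isPrefixOf (c :: cs) then some ([], (c :: cs).drop sep.length)
    else
      match pvPartition sep cs with
      | none => none
      | some (a, b) => some (c :: a, b)

theorem pvPartition_append {sep : List Char} : ∀ {s a b : List Char},
    pvPartition sep s = some (a, b) → s = a ++ sep ++ b := by
  intro s
  induction s with
  | nil =>
    intro a b h
    simp only [pvPartition] at h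
    split at h
    · rename_i hp
      have : sep = [] := List.prefix_nil.mp (List.isPrefixOf_iff_prefix.mp hp)
      simp_all
    · exact absurd h (by simp)
  | cons c cs ih =>
    intro a b h
    simp only [pvPartition] at h
    split at h
    · rename_i hp
      obtain ⟨t, ht⟩ := (List.isPrefixOf_iff_prefix.mp hp)
      obtain ⟨rfl, rfl⟩ : a = [] ∧ b = (c :: cs).drop sep.length := by
        constructor <;> · injection h with h'; simp_all
      simp only [List.nil_append]
      rw [← ht, List.drop_left]
    · cases hm : pvPartition sep cs with
      | none => rw [hm] at h; exact absurd h (by simp)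
      | some p =>
        obtain ⟨a', b'⟩ := p
        rw [hm] at h
        injection h with h'
        obtain ⟨rfl, rfl⟩ : a = c :: a' ∧ b = b' := by constructor <;> simp_all
        simp [ih hm]

-- the match list of finditer on this pattern: (group 1, optional group 2) per match, leftmost, resuming at each match's end.
-- Exact for this pattern: a match needs "![" then "]"; if the "]" search fails here no later match exists either.
def pvFindIter (s : List Char) : List (List Char × Option (List Char)) :=
  match h1 : pvPartition ['!', '['] s with
  | none => []
  | some (_, s1) =>
    match h2 : pvPartition [']'] s1 with
    | none => []
    | some (alt, s2) =>
      match h3 : s2 with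
      | '(' :: s3 =>
        match h4 : pvPartition [')'] s3 with
        | some (body, s4) => (alt, some body) :: pvFindIter s4
        | none => (alt, none) :: pvFindIter s2
      | _ => (alt, none) :: pvFindIter s2
  termination_by s.length
  decreasing_by
  · have l1 := congrArg List.length (pvPartition_append h1)
    have l2 := congrArg List.length (pvPartition_append h2)
    have l3 := congrArg List.length h3
    have l4 := congrArg List.length (pvPartition_append h4)
    simp at l1 l2 l3 l4; omega
  · have l1 := congrArg List.length (pvPartition_append h1)
    have l2 := congrArg List.length (pvPartition_append h2)
    have l3 := congrArg List.length h3
    simp at l1 l2 l3; omega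
  · have l1 := congrArg List.length (pvPartition_append h1)
    have l2 := congrArg List.length (pvPartition_append h2)
    have l3 := congrArg List.length h3
    simp at l1 l2 l3; omega

def pvEntry (m : List Char × Option (List Char)) : Option String × Option String :=
  (pvOrNone m.1, match m.2 with | some u => pvOrNone u | none => none)

def extract_markdown_images_alt (text : String) : List (Option String × Option String) :=
  (pvFindIter text.toList).map pvEntry

-- ===== PRECONDITION & SPEC =====
def Spec_extract_markdown_images (text : String) (out : List (Option String × Option String)) : Prop := out = extract_markdown_images_alt text
instance (text : String) (out : List (Option String × Option String)) : Decidable (Spec_extract_markdown_images text out) := by unfold Spec_extract_markdown_images; infer_instance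

-- ===== CLAIM (what is proved, stated in full; the proofs are below) =====
def Claim_equal_extract_markdown_images : Prop := ∀ (text : String), Dom_extract_markdown_images text → Spec_extract_markdown_images text (extract_markdown_images text)

-- ===== LEMMAS AND PROOFS =====

theorem pvPartition_eq_none_iff {sep : List Char} (hsep : sep ≠ []) : ∀ {s : List Char},
    pvPartition sep s = none ↔ ∀ j, ¬ sep <+: s.drop j := by
  intro s
  induction s with
  | nil =>
    simp only [pvPartition]
    have : ¬ sep.isPrefixOf ([] : List Char) := by
      intro hp; exact hsep (List.prefix_nil.mp (List.isPrefixOf_iff_prefix.mp hp))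
    simp [this]
    exact hsep
  | cons c cs ih =>
    simp only [pvPartition]
    by_cases hp : sep.isPrefixOf (c :: cs)
    · simp [hp]
      exact ⟨0, by simpa using List.isPrefixOf_iff_prefix.mp hp⟩
    · rw [if_neg (by simpa using hp)]
      constructor
      · intro h j
        cases j with
        | zero => simpa using fun hpre => hp (List.isPrefixOf_iff_prefix.mpr hpre)
        | succ j =>
          have : pvPartition sep cs = none := by
            cases hm : pvPartition sep cs with
            | none => rfl
            | some p => obtain ⟨a,b⟩ := p; simp [hm] at h
          simpa using (ih.mp this) j
      · intro h
        have : pvPartition sep cs = none := ih.mpr (fun j => by simpa using h (j+1))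
        simp [this]

theorem pvPartition_minimal {sep : List Char} : ∀ {s a b : List Char},
    pvPartition sep s = some (a, b) → ∀ j < a.length, ¬ sep <+: s.drop j := by
  intro s
  induction s with
  | nil =>
    intro a b h
    simp only [pvPartition] at h
    split at h
    · injection h with h'; intro j hj; simp_all
    · exact absurd h (by simp)
  | cons c cs ih =>
    intro a b h
    simp only [pvPartition] at h
    split at h
    · injection h with h'
      intro j hj
      have : a = [] := by simp_all
      simp [this] at hj
    · rename_i hp
      cases hm : pvPartition sep cs with
      | none => rw [hm] at h; exact absurd h (by simp)
      | some p =>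
        obtain ⟨a', b'⟩ := p
        rw [hm] at h
        injection h with h'
        obtain ⟨rfl, rfl⟩ : a = c :: a' ∧ b = b' := by constructor <;> simp_all
        intro j hj
        cases j with
        | zero => simpa using fun hpre => hp (List.isPrefixOf_iff_prefix.mpr hpre)
        | succ j => simpa using ih hm j (by simpa using hj)

theorem pvPart_none_of_find_neg {cs sub : List Char} {k : Nat} (hsub : sub ≠ []) (hk : k ≤ cs.length)
    (h : PySem.Chars.findFrom cs sub (k : Int) none = -1) : pvPartition sub (cs.drop k) = none := by
  have hinf : ¬ sub <:+: cs.drop k :=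
    (PySem.Chars.findFrom_natCast_eq_neg_one_iff cs sub k hk).mp h
  rw [pvPartition_eq_none_iff hsub]
  intro j hpre
  exact hinf (hpre.isInfix.trans (List.drop_suffix j _).isInfix)

theorem pvPart_some_of_find {cs sub : List Char} {k : Nat} (hsub : sub ≠ []) (hk : k ≤ cs.length)
    (h : PySem.Chars.findFrom cs sub (k : Int) none ≠ -1) :
    (k : Int) ≤ PySem.Chars.findFrom cs sub (k : Int) none ∧
    (PySem.Chars.findFrom cs sub (k : Int) none).toNat + sub.length ≤ cs.length ∧
    pvPartition sub (cs.drop k) =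
      some ((cs.drop k).take ((PySem.Chars.findFrom cs sub (k : Int) none).toNat - k),
            cs.drop ((PySem.Chars.findFrom cs sub (k : Int) none).toNat + sub.length)) := by
  obtain ⟨h1, h2, h3⟩ := PySem.Chars.findFrom_natCast_spec cs sub k hk h
  set r := PySem.Chars.findFrom cs sub (k : Int) none with hr
  have hkr : k ≤ r.toNat := by omega
  have hsublen : 0 < sub.length := List.length_pos_iff.mpr hsub
  have hlen : sub.length ≤ (cs.drop r.toNat).length := h2.length_le
  have hbound : r.toNat + sub.length ≤ cs.length := by
    simp [List.length_drop] at hlen; omega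
  refine ⟨h1, hbound, ?_⟩
  have hdd : ∀ j : Nat, (cs.drop k).drop j = cs.drop (k + j) := by
    intro j; rw [List.drop_drop]
  cases hm : pvPartition sub (cs.drop k) with
  | none =>
    exfalso
    have := (pvPartition_eq_none_iff hsub).mp hm (r.toNat - k)
    rw [hdd] at this
    have : ¬ sub <+: cs.drop r.toNat := by
      have e : k + (r.toNat - k) = r.toNat := by omega
      rwa [e] at this
    exact this h2
  | some p =>
    obtain ⟨a, b⟩ := p
    have e := pvPartition_append hm
    have hpa : sub <+: cs.drop (k + a.length) := by
      rw [← hdd, e, List.append_assoc, List.drop_left]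
      exact ⟨b, rfl⟩
    have halen : k + a.length = r.toNat := by
      rcases lt_trichotomy (k + a.length) r.toNat with hlt | heq | hgt
      · exact absurd hpa (h3 (k + a.length) (by omega) (by omega))
      · exact heq
      · exfalso
        have hm' := pvPartition_minimal hm (r.toNat - k) (by omega)
        rw [hdd] at hm'
        have e2 : k + (r.toNat - k) = r.toNat := by omega
        rw [e2] at hm'
        exact hm' h2
    have ha : a = (cs.drop k).take (r.toNat - k) := by
      have ht : (a ++ (sub ++ b)).take a.length = a := List.take_left
      rw [e, List.append_assoc, show r.toNat - k = a.length from by omega, ht]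
    have hb : b = cs.drop (r.toNat + sub.length) := by
      have hd : ((a ++ sub) ++ b).drop ((a ++ sub)).length = b := List.drop_left
      rw [show r.toNat + sub.length = k + (a.length + sub.length) from by omega, ← hdd, e]
      simp only [List.length_append] at hd
      exact hd.symm
    rw [← ha, ← hb]


theorem pvPartition_nil_of_ne {sep : List Char} (hsub : sep ≠ []) : pvPartition sep [] = none := by
  cases sep with
  | nil => simp at hsub
  | cons c cs => simp [pvPartition, List.isPrefixOf]


theorem pvFindIter_none1 {s : List Char} (h : pvPartition ['!', '['] s = none) :
    pvFindIter s = [] := by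
  rw [pvFindIter.eq_def, h]

theorem pvFindIter_nil : pvFindIter [] = [] :=
  pvFindIter_none1 (pvPartition_nil_of_ne (by simp))

theorem pvFindIter_none2 {s p s1 : List Char} (h1 : pvPartition ['!', '['] s = some (p, s1))
    (h2 : pvPartition [']'] s1 = none) : pvFindIter s = [] := by
  rw [pvFindIter.eq_def, h1]
  repeat' split
  all_goals simp_all

theorem pvFindIter_paren_some {s p s1 alt s3 body s4 : List Char}
    (h1 : pvPartition ['!', '['] s = some (p, s1))
    (h2 : pvPartition [']'] s1 = some (alt, '(' :: s3))
    (h3 : pvPartition [')'] s3 = some (body, s4)) :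
    pvFindIter s = (alt, some body) :: pvFindIter s4 := by
  rw [pvFindIter.eq_def, h1]
  repeat' split
  all_goals simp_all

theorem pvFindIter_paren_none {s p s1 alt s3 : List Char}
    (h1 : pvPartition ['!', '['] s = some (p, s1))
    (h2 : pvPartition [']'] s1 = some (alt, '(' :: s3))
    (h3 : pvPartition [')'] s3 = none) :
    pvFindIter s = (alt, none) :: pvFindIter ('(' :: s3) := by
  rw [pvFindIter.eq_def, h1]
  repeat' split
  all_goals simp_all

theorem pvFindIter_noparen {s p s1 alt s2 : List Char}
    (h1 : pvPartition ['!', '['] s = some (p, s1))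
    (h2 : pvPartition [']'] s1 = some (alt, s2))
    (h3 : s2.head? ≠ some '(') :
    pvFindIter s = (alt, none) :: pvFindIter s2 := by
  rw [pvFindIter.eq_def, h1]
  repeat' split
  all_goals simp_all
  rw [← h2.2] at h3
  exact h3 rfl

theorem pvFindIter_cons_paren (t : List Char) : pvFindIter ('(' :: t) = pvFindIter t := by
  rw [pvFindIter.eq_def]
  conv_rhs => rw [pvFindIter.eq_def]
  simp only [pvPartition]
  cases h : pvPartition ['!', '['] t with
  | none => rfl
  | some p => obtain ⟨a, b⟩ := p; rfl

theorem pvMain (fuel : Nat) : ∀ (cs : List Char) (k : Nat), cs.length < k + fuel →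
    pvGoA cs fuel (k : Int) = (pvFindIter (cs.drop k)).map pvEntry := by
  induction fuel with
  | zero =>
    intro cs k hlen
    rw [List.drop_eq_nil_of_le (by omega), pvFindIter_nil]
    rfl
  | succ fuel ih =>
    intro cs k hlen
    rw [pvGoA]
    by_cases hk : (k : Int) < (cs.length : Int)
    case neg =>
      rw [if_neg hk]
      rw [List.drop_eq_nil_of_le (by exact_mod_cast not_lt.mp hk), pvFindIter_nil]
      rfl
    case pos =>
      rw [if_pos hk]
      have hk1 : k ≤ cs.length := by exact_mod_cast le_of_lt hk
      by_cases hb : PySem.Chars.findFrom cs ['!', '['] (k : Int) = -1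
      · rw [if_pos hb, pvFindIter_none1 (pvPart_none_of_find_neg (by simp) hk1 hb)]
        rfl
      · rw [if_neg hb]
        obtain ⟨hb1, hb2, hbpart⟩ := pvPart_some_of_find (by simp) hk1 hb
        set bang := PySem.Chars.findFrom cs ['!', '['] (k : Int) with hbang
        set B := bang.toNat with hB
        norm_num at hb2 hbpart
        have hkB : k ≤ B := by omega
        have hcast : bang + 2 = ((B + 2 : Nat) : Int) := by omega
        rw [hcast]
        by_cases hc : PySem.Chars.findFrom cs [']'] ((B + 2 : Nat) : Int) = -1
        · rw [if_pos hc, pvFindIter_none2 hbpart (pvPart_none_of_find_neg (by simp) hb2 hc)]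
          rfl
        · rw [if_neg hc]
          obtain ⟨hc1, hc2, hcpart⟩ := pvPart_some_of_find (by simp) hb2 hc
          set cb := PySem.Chars.findFrom cs [']'] ((B + 2 : Nat) : Int) with hcb
          set C := cb.toNat with hC
          norm_num at hc2 hcpart
          have hBC : B + 2 ≤ C := by omega
          have hcastC : cb = ((C : Nat) : Int) := by omega
          have halt : pvOrNone (PySem.List.slice cs (some ((B + 2 : Nat) : Int)) (some cb)) =
              pvOrNone ((cs.drop (B + 2)).take (C - (B + 2))) := by
            rw [hcastC, PySem.List.slice_natCast]
          by_cases hlt : C + 1 < cs.length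
          case pos =>
            have hdropC : cs.drop (C + 1) = cs[C + 1] :: cs.drop (C + 2) :=
              List.drop_eq_getElem_cons hlt
            have hcast1 : cb + 1 = ((C + 1 : Nat) : Int) := by omega
            by_cases hch : cs[C + 1] = '('
            case pos =>
              have hcond : (decide (cb + 1 < (cs.length : Int)) &&
                  (PySem.List.pyGet? cs (cb + 1) == some '(')) = true := by
                rw [hcast1, PySem.List.pyGet?_natCast, List.getElem?_eq_getElem hlt]
                simp [hch]
                exact_mod_cast hlt
              rw [if_pos hcond]
              have hcast2 : cb + 2 = ((C + 2 : Nat) : Int) := by omega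
              rw [hcast2]
              rw [hch] at hdropC
              rw [hdropC] at hcpart
              by_cases hp : PySem.Chars.findFrom cs [')'] ((C + 2 : Nat) : Int) = -1
              case pos =>
                rw [if_neg (by simpa using hp)]
                have hppart := pvPart_none_of_find_neg (by simp) (by omega) hp
                rw [pvFindIter_paren_none hbpart hcpart hppart, pvFindIter_cons_paren,
                  List.map_cons, ih cs (C + 2) (by omega)]
                rw [halt]
                rfl
              case neg =>
                rw [if_pos (by simpa using hp)]
                obtain ⟨hp1, hp2, hppart⟩ := pvPart_some_of_find (by simp) (by omega) hp
                set cp := PySem.Chars.findFrom cs [')'] ((C + 2 : Nat) : Int) with hcp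
                set P := cp.toNat with hP
                norm_num at hp2 hppart
                have hCP : C + 2 ≤ P := by omega
                have hcastP : cp = ((P : Nat) : Int) := by omega
                have hurl : pvOrNone (PySem.List.slice cs (some ((C + 2 : Nat) : Int)) (some cp)) =
                    pvOrNone ((cs.drop (C + 2)).take (P - (C + 2))) := by
                  rw [hcastP, PySem.List.slice_natCast]
                have hcastP1 : cp + 1 = ((P + 1 : Nat) : Int) := by omega
                rw [hcastP1]
                rw [pvFindIter_paren_some hbpart hcpart hppart, List.map_cons,
                  ih cs (P + 1) (by omega), halt, hurl]
                rfl
            case neg =>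
              have hcond : (decide (cb + 1 < (cs.length : Int)) &&
                  (PySem.List.pyGet? cs (cb + 1) == some '(')) = false := by
                rw [hcast1, PySem.List.pyGet?_natCast, List.getElem?_eq_getElem hlt]
                simp [hch]
              rw [if_neg (by simp [hcond])]
              have hhead : (cs.drop (C + 1)).head? ≠ some '(' := by
                rw [hdropC, List.head?_cons]
                simpa using hch
              rw [hcast1, pvFindIter_noparen hbpart hcpart hhead, List.map_cons,
                ih cs (C + 1) (by omega), halt]
              rfl
          case neg =>
            have hCeq : cs.drop (C + 1) = [] := List.drop_eq_nil_of_le (by omega)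
            have hcond : (decide (cb + 1 < (cs.length : Int)) &&
                (PySem.List.pyGet? cs (cb + 1) == some '(')) = false := by
              have : ¬ (cb + 1 < (cs.length : Int)) := by omega
              simp [this]
            rw [if_neg (by simp [hcond])]
            have hhead : (cs.drop (C + 1)).head? ≠ some '(' := by simp [hCeq]
            have hcast1 : cb + 1 = ((C + 1 : Nat) : Int) := by omega
            rw [hcast1, pvFindIter_noparen hbpart hcpart hhead, List.map_cons,
              ih cs (C + 1) (by omega), halt]
            rfl

-- ===== VERDICT (by name: the statement is the Claim_ definition above) =====
theorem extract_markdown_images_spec : Claim_equal_extract_markdown_images := by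
  intro text _
  unfold Spec_extract_markdown_images extract_markdown_images extract_markdown_images_alt
  have := pvMain (text.toList.length + 1) text.toList 0 (by omega)
  simpa using this
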